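-- pv_equiv track=rewrite | github.com/Project-N-E-K-O/N.E.K.O | main_logic/activity/state_machine.py | _strip_emotion_tags
-- ===== SOURCE A (Python) =====
-- def _strip_emotion_tags(text: str) -> str:
--     """Drop ``<emotion>`` decoration so it doesn't count toward tail.
--
--     AI replies sometimes end with ``<happy>`` style tags that the TTS
--     pipeline already strips elsewhere; we apply the same scrub here so
--     question detection doesn't get tripped up by them.
--     """
--     if not text or '<' not in text:
--         return text
--     out: list[str] = []
--     in_tag = False
--     for ch in text:
--         if ch == '<':
--             in_tag = True
--             continue
--         if ch == '>' and in_tag: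
--             in_tag = False
--             continue
--         if not in_tag:
--             out.append(ch)
--     return ''.join(out)
-- ===== SOURCE B (Python) =====
-- def _strip_emotion_tags(text: str) -> str:
--     """Drop <emotion> style tags via find/slice jumps instead of a char state machine."""
--     if not text or '<' not in text:
--         return text
--     out = []
--     i = 0
--     while True:
--         k = text.find('<', i)
--         if k == -1:
--             out.append(text[i:])
--             break
--         out.append(text[i:k])
--         j = text.find('>', k + 1)
--         if j == -1:
--             break
--         i = j + 1
--     return ''.join(out)
-- ===== Notes on version B (the rewrite author's own statement) =====
-- stated objective: alternative
-- what changed: Replaced the per-character boolean state machine with a find/slice loop that jumps between tag delimiters and copies whole untagged chunks.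
import Mathlib
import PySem

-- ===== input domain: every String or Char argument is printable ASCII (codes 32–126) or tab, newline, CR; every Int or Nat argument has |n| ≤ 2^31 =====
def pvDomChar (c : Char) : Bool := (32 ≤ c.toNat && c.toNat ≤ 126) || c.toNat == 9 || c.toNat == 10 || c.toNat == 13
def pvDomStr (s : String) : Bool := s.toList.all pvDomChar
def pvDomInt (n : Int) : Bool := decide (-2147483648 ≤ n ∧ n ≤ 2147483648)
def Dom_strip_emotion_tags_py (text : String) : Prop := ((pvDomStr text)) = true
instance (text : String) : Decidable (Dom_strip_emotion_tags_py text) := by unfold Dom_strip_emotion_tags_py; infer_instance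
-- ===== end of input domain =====

-- B replaces A's per-character boolean state machine with a find/slice loop that jumps
-- between '<' and '>' positions and copies whole untagged chunks (objective: alternative).

-- ===== PORT A =====
-- one step of A's `for ch in text` loop: state = (in_tag, out)
def stripStep (s : Bool × List Char) (ch : Char) : Bool × List Char :=
  if ch = '<' then (true, s.2)
  else if ch = '>' ∧ s.1 = true then (false, s.2)
  else if s.1 = false then (s.1, s.2 ++ [ch])
  else s

def strip_emotion_tags_py (text : String) : String :=
  if text.toList = [] ∨ '<' ∉ text.toList then text
  else String.mk ((text.toList.foldl stripStep (false, [])).2)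

-- ===== PORT B =====
-- Source B's while loop on an index i, expressed on the suffix text[i:]:
-- text.find('<', i) / text.find('>', k+1) are findIdx? on the current suffix.
def altGo (cs : List Char) : List Char :=
  match h : List.findIdx? (· = '<') cs with
  | none => cs                                   -- k == -1: append text[i:] and stop
  | some k =>
    match List.findIdx? (· = '>') (cs.drop (k+1)) with
    | none => cs.take k                          -- j == -1: break (drop the tail)
    | some j => cs.take k ++ altGo ((cs.drop (k+1)).drop (j+1))
termination_by cs.length
decreasing_by
  have hk := (List.findIdx?_eq_some_iff_findIdx_eq.mp h).1
  simp only [List.length_drop]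
  omega

def strip_emotion_tags_py_alt (text : String) : String :=
  if text.toList = [] ∨ '<' ∉ text.toList then text
  else String.mk (altGo text.toList)

-- ===== PRECONDITION & SPEC =====
def Spec_strip_emotion_tags_py (text : String) (out : String) : Prop := out = strip_emotion_tags_py_alt text
instance (text : String) (out : String) : Decidable (Spec_strip_emotion_tags_py text out) := by unfold Spec_strip_emotion_tags_py; infer_instance

-- ===== CLAIM (what is proved, stated in full; the proofs are below) =====
def Claim_equal_strip_emotion_tags_py : Prop := ∀ (text : String), Dom_strip_emotion_tags_py text → Spec_strip_emotion_tags_py text (strip_emotion_tags_py text)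

-- ===== LEMMAS AND PROOFS =====

-- functional form of A's state machine, for reasoning
def sm : Bool → List Char → List Char
  | _, [] => []
  | b, c :: cs =>
    if c = '<' then sm true cs
    else if c = '>' ∧ b = true then sm false cs
    else if b = false then c :: sm false cs
    else sm b cs

theorem foldl_stripStep_eq_sm (cs : List Char) : ∀ (b : Bool) (acc : List Char),
    (cs.foldl stripStep (b, acc)).2 = acc ++ sm b cs := by
  induction cs with
  | nil => intro b acc; simp [sm]
  | cons c cs ih =>
    intro b acc
    simp only [List.foldl_cons, stripStep, sm]
    split_ifs with h1 h2 h3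
    · simp [ih]
    · simp [ih]
    · simp [h3, ih]
    · cases b with
      | false => simp at h3
      | true => simp [ih]

theorem sm_false_no_lt (cs : List Char) (h : '<' ∉ cs) : sm false cs = cs := by
  induction cs with
  | nil => rfl
  | cons c cs ih =>
    simp only [List.mem_cons, not_or] at h
    simp [sm, Ne.symm h.1, ih h.2]

theorem sm_false_append (pre suf : List Char) (h : '<' ∉ pre) :
    sm false (pre ++ suf) = pre ++ sm false suf := by
  induction pre with
  | nil => rfl
  | cons c pre ih =>
    simp only [List.mem_cons, not_or] at h
    simp [sm, Ne.symm h.1, ih h.2]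

theorem sm_true_no_gt (cs : List Char) (h : '>' ∉ cs) : sm true cs = [] := by
  induction cs with
  | nil => rfl
  | cons c cs ih =>
    simp only [List.mem_cons, not_or] at h
    by_cases hc : c = '<' <;> simp [sm, hc, Ne.symm h.1, ih h.2]

theorem sm_true_append (pre suf : List Char) (h : '>' ∉ pre) :
    sm true (pre ++ '>' :: suf) = sm false suf := by
  induction pre with
  | nil => simp [sm]
  | cons c pre ih =>
    simp only [List.mem_cons, not_or] at h
    by_cases hc : c = '<' <;> simp [sm, hc, Ne.symm h.1, ih h.2]

theorem findIdx?_decomp (p : Char → Bool) (cs : List Char) (k : Nat)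
    (h : List.findIdx? p cs = some k) :
    ∃ pre c suf, cs = pre ++ c :: suf ∧ pre.length = k ∧ p c ∧ ∀ x ∈ pre, ¬ p x := by
  rw [List.findIdx?_eq_some_iff_findIdx_eq] at h
  obtain ⟨hk, hf⟩ := h
  refine ⟨cs.take k, cs[k], cs.drop (k+1), ?_, ?_, ?_, ?_⟩
  · conv_lhs => rw [← List.take_append_drop k cs]
    rw [List.drop_eq_getElem_cons hk]
  · simp [hk.le]
  · subst hf; exact List.findIdx_getElem
  · intro x hx
    obtain ⟨i, hi, rfl⟩ := List.mem_iff_getElem.mp hx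
    have hik : i < k := by simpa [hk.le] using hi
    subst hf
    simp only [Bool.not_eq_true]
    rw [List.getElem_take]
    exact List.not_of_lt_findIdx hik

theorem altGo_eq_sm : ∀ (n : Nat) (cs : List Char), cs.length ≤ n → altGo cs = sm false cs := by
  intro n
  induction n with
  | zero =>
    intro cs hcs
    have : cs = [] := by cases cs <;> simp_all
    subst this
    rw [altGo]
    simp [sm]
  | succ n ih =>
    intro cs hcs
    rw [altGo]
    split
    next hfind =>
      have hno : '<' ∉ cs := by
        intro hm
        have := List.findIdx?_eq_none_iff.mp hfind '<' hm
        simp at this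
      simp [sm_false_no_lt cs hno]
    next k hfind =>
      obtain ⟨pre, c, suf, hcseq, hlen, hc, hpre⟩ := findIdx?_decomp _ cs k hfind
      have hc' : c = '<' := by simpa using hc
      subst hc'
      have hpre' : '<' ∉ pre := fun hm => by simpa using hpre _ hm
      have htake : cs.take k = pre := by rw [hcseq, ← hlen, List.take_left]
      have hdrop : cs.drop (k+1) = suf := by
        have hsplit : cs = (pre ++ ['<']) ++ suf := by simp [hcseq]
        rw [hsplit, List.drop_left' (by simp [hlen])]
      have hsm : sm false cs = pre ++ sm true suf := by
        rw [hcseq, sm_false_append pre _ hpre']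
        simp [sm]
      split
      next hfind2 =>
        have hno : '>' ∉ suf := by
          intro hm
          have := List.findIdx?_eq_none_iff.mp hfind2 '>' (by rwa [hdrop])
          simp at this
        simp [htake, hsm, sm_true_no_gt suf hno]
      next j hfind2 =>
        rw [hdrop] at hfind2
        obtain ⟨pre2, c2, suf2, hsufeq, hlen2, hc2, hpre2⟩ := findIdx?_decomp _ suf j hfind2
        have hc2' : c2 = '>' := by simpa using hc2
        subst hc2'
        have hpre2' : '>' ∉ pre2 := fun hm => by simpa using hpre2 _ hm
        have hdrop2 : (cs.drop (k+1)).drop (j+1) = suf2 := by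
          rw [hdrop]
          have hsplit2 : suf = (pre2 ++ ['>']) ++ suf2 := by simp [hsufeq]
          rw [hsplit2, List.drop_left' (by simp [hlen2])]
        have hsuf2len : suf2.length ≤ n := by
          have h1 : cs.length = pre.length + 1 + suf.length := by
            simp only [hcseq, List.length_append, List.length_cons]; omega
          have h2 : suf.length = pre2.length + 1 + suf2.length := by
            simp only [hsufeq, List.length_append, List.length_cons]; omega
          omega
        rw [htake, hdrop2, ih suf2 hsuf2len, hsm, hsufeq,
          sm_true_append pre2 suf2 hpre2']

-- ===== VERDICT (by name: the statement is the Claim_ definition above) =====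
theorem strip_emotion_tags_py_spec : Claim_equal_strip_emotion_tags_py := by
  intro text _
  unfold Spec_strip_emotion_tags_py strip_emotion_tags_py strip_emotion_tags_py_alt
  split_ifs with h
  · rfl
  · rw [foldl_stripStep_eq_sm, altGo_eq_sm text.toList.length text.toList le_rfl]
    simp
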